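-- pv_equiv track=rewrite | github.com/PhamNhatMinh21/Python-CodePtit | liet ke so dep.py | check
-- ===== SOURCE A (Python) =====
-- def check(n):
--     n = str(n)
--     if len(n) % 2 == 1:
--         return False
--     if n != n[::-1]:
--         return False
--     for x in n:
--         if int(x) % 2 == 1:
--             return False
--     return True
-- ===== SOURCE B (Python) =====
-- def check(n):
--     s = str(n)
--     if len(s) % 2 == 1:
--         return False
--     i, j = 0, len(s) - 1
--     while i < j:
--         if s[i] != s[j] or int(s[i]) % 2 == 1:
--             return False
--         i += 1
--         j -= 1
--     return True
-- ===== Notes on version B (the rewrite author's own statement) =====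
-- stated objective: alternative
-- what changed: Replaces A's reverse-compare pass plus a separate full digit-parity pass with a single two-pointer loop that checks the mirrored pair and the left digit's parity together.
import Mathlib
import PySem

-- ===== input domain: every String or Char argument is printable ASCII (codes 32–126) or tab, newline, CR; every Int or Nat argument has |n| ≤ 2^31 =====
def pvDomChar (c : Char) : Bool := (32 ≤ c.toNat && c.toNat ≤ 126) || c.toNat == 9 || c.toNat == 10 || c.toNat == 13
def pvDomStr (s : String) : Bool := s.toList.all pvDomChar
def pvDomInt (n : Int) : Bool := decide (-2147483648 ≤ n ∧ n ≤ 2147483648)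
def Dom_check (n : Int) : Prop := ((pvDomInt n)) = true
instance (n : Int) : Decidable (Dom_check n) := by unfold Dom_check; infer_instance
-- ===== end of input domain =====

-- B replaces A's reverse-compare pass plus a separate full digit-parity pass with one
-- two-pointer loop checking each mirrored pair and the left digit's parity together (alternative decomposition).

-- shared one-liner for Python's 'int(x) % 2 == 1' on a single character x
-- (int(x) would raise on a non-digit; both programs only reach it on digit characters,
-- so the .getD 0 default is never the computed value on any admitted input)
def pvDigitOdd (c : Char) : Bool := PySem.Int.mod ((PySem.Int.ofChars? [c]).getD 0) 2 == 1

-- ===== PORT A =====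
-- the 'for x in n: if int(x) % 2 == 1: return False' loop
def checkDigits (cs : List Char) : Bool :=
  match cs with
  | [] => true
  | c :: t => if pvDigitOdd c then false else checkDigits t

def check (n : Int) : Bool :=
  let s := PySem.Int.toChars n
  if s.length % 2 == 1 then false
  else if s ≠ s.reverse then false
  else checkDigits s

-- ===== PORT B =====
-- the 'while i < j' two-pointer loop (indices are in range whenever i < j ≤ len-1, so getD's default is never read)
def altLoop (s : List Char) (i j : Nat) : Bool :=
  if i < j then
    if s.getD i ' ' ≠ s.getD j ' ' || pvDigitOdd (s.getD i ' ') then false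
    else altLoop s (i + 1) (j - 1)
  else true
termination_by j - i

def check_alt (n : Int) : Bool :=
  let s := PySem.Int.toChars n
  if s.length % 2 == 1 then false
  else altLoop s 0 (s.length - 1)

-- ===== PRECONDITION & SPEC =====
def Spec_check (n : Int) (out : Bool) : Prop := out = check_alt n
instance (n : Int) (out : Bool) : Decidable (Spec_check n out) := by unfold Spec_check; infer_instance

-- ===== CLAIM (what is proved, stated in full; the proofs are below) =====
def Claim_equal_check : Prop := ∀ (n : Int), Dom_check n → Spec_check n (check n)

-- ===== LEMMAS AND PROOFS =====

theorem checkDigits_eq_all (cs : List Char) : checkDigits cs = cs.all (fun c => ! pvDigitOdd c) := by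
  induction cs with
  | nil => rfl
  | cons c t ih =>
    simp only [checkDigits, List.all_cons, ih]
    by_cases h : pvDigitOdd c <;> simp [h]

theorem altLoop_iff (s : List Char) (i j : Nat) :
    altLoop s i j = true ↔
      ∀ k, i ≤ k → 2 * k < i + j →
        (s.getD k ' ' = s.getD (i + j - k) ' ' ∧ pvDigitOdd (s.getD k ' ') = false) := by
  induction i, j using altLoop.induct s with
  | case1 i j hij hbad =>
    rw [altLoop, if_pos hij, if_pos hbad]
    constructor
    · intro h; cases h
    · intro h
      have hk := h i (le_refl i) (by omega)
      rw [show i + j - i = j from by omega] at hk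
      rw [Bool.or_eq_true] at hbad
      rcases hbad with hb | hb
      · exact absurd hk.1 (of_decide_eq_true hb)
      · rw [hk.2] at hb; cases hb
  | case2 i j hij hok ih =>
    rw [altLoop, if_pos hij, if_neg hok]
    have h1 : s.getD i ' ' = s.getD j ' ' := by
      by_contra hne
      exact hok (by rw [Bool.or_eq_true]; exact Or.inl (decide_eq_true hne))
    have h2 : pvDigitOdd (s.getD i ' ') = false := by
      cases hpd : pvDigitOdd (s.getD i ' ') with
      | false => rfl
      | true => exact absurd (by rw [Bool.or_eq_true]; exact Or.inr hpd) hok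
    rw [ih, show i + 1 + (j - 1) = i + j from by omega]
    constructor
    · intro h k hik hk
      rcases Nat.eq_or_lt_of_le hik with rfl | hlt
      · rw [show i + j - i = j from by omega]
        exact ⟨h1, h2⟩
      · exact h k hlt hk
    · intro h k hik hk
      exact h k (by omega) hk
  | case3 i j hij =>
    rw [altLoop, if_neg hij]
    constructor
    · intro _ k hik hk; omega
    · intro _; rfl

-- convert the pair conditions to getElem form
theorem pairs_getElem (s : List Char)
    (hP : ∀ k, 0 ≤ k → 2 * k < 0 + (s.length - 1) →
        (s.getD k ' ' = s.getD (0 + (s.length - 1) - k) ' ' ∧ pvDigitOdd (s.getD k ' ') = false)) :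
    ∀ k (hk : 2 * k < s.length - 1),
      s[k]'(by omega) = s[s.length - 1 - k]'(by omega) ∧ pvDigitOdd (s[k]'(by omega)) = false := by
  intro k hk
  have h := hP k (Nat.zero_le k) (by omega)
  simp only [Nat.zero_add] at h
  rw [List.getD_eq_getElem s ' ' (show k < s.length from by omega),
    List.getD_eq_getElem s ' ' (show s.length - 1 - k < s.length from by omega)] at h
  exact h

-- reconstruct the palindrome from the mirrored-pair conditions (even length)
theorem pal_of_pairs (s : List Char) (h : s.length % 2 = 0)
    (hP : ∀ k (hk : 2 * k < s.length - 1),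
      s[k]'(by omega) = s[s.length - 1 - k]'(by omega)) : s = s.reverse := by
  apply List.ext_getElem (by simp)
  intro k hk _
  rw [List.getElem_reverse]
  by_cases hc : 2 * k < s.length - 1
  · exact hP k hc
  · have hne : 2 * k ≠ s.length - 1 := by omega
    have hk2 : 2 * (s.length - 1 - k) < s.length - 1 := by omega
    have he := hP (s.length - 1 - k) hk2
    have hid : s.length - 1 - (s.length - 1 - k) = k := by omega
    rw [getElem_congr rfl hid (by omega)] at he
    exact he.symm

-- the heart: on an even-length list, "palindrome and all digits even" = the two-pointer loop
theorem main_eq (s : List Char) (h : s.length % 2 = 0) :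
    (if s ≠ s.reverse then false else checkDigits s) = altLoop s 0 (s.length - 1) := by
  rw [Bool.eq_iff_iff, altLoop_iff]
  by_cases hne : s = s.reverse
  · rw [if_neg (fun hx => hx hne), checkDigits_eq_all]
    constructor
    · -- all digits even → pairs hold
      intro hA k _ hk
      rw [List.all_eq_true] at hA
      have hkL : k < s.length := by omega
      have hkL' : 0 + (s.length - 1) - k < s.length := by omega
      rw [List.getD_eq_getElem s ' ' hkL, List.getD_eq_getElem s ' ' hkL']
      refine ⟨?_, ?_⟩
      · rw [List.getElem_of_eq hne, List.getElem_reverse]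
        exact getElem_congr rfl (by omega) (by omega)
      · have hb : (!pvDigitOdd s[k]) = true := hA s[k] (s.getElem_mem hkL)
        rw [Bool.not_eq_true'] at hb
        exact hb
    · -- pairs hold → all digits even
      intro hP
      have HP := pairs_getElem s hP
      rw [List.all_eq_true]
      intro c hc
      rcases List.mem_iff_getElem.mp hc with ⟨k, hk, rfl⟩
      by_cases hck : 2 * k < s.length - 1
      · rw [(HP k hck).2]; rfl
      · have hne2 : 2 * k ≠ s.length - 1 := by omega
        have hk2 : 2 * (s.length - 1 - k) < s.length - 1 := by omega
        rcases HP (s.length - 1 - k) hk2 with ⟨he, hev⟩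
        have hid : s.length - 1 - (s.length - 1 - k) = k := by omega
        rw [getElem_congr rfl hid (by omega)] at he
        rw [he] at hev
        rw [hev]; rfl
  · rw [if_pos hne]
    constructor
    · intro hfalse; cases hfalse
    · intro hP
      exact absurd (pal_of_pairs s h (fun k hk => (pairs_getElem s hP k hk).1)) hne

-- ===== VERDICT (by name: the statement is the Claim_ definition above) =====
theorem check_spec : Claim_equal_check := by
  intro n _
  unfold Spec_check check check_alt
  set s := PySem.Int.toChars n with hs
  by_cases hodd : s.length % 2 == 1
  · simp [hodd]
  · have h2 : s.length % 2 = 0 := by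
      simp only [beq_iff_eq] at hodd; omega
    simp only [hodd, if_false, Bool.false_eq_true]
    exact main_eq s h2
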